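-- pv_equiv track=rewrite | github.com/danyellambert/ai-workbench-local | src/rag/loaders.py | _build_shadow_rollout_report
-- ===== SOURCE A (Python) =====
-- def _merge_contact_lists(legacy_values: list[str], evidence_values: list[str]) -> tuple[list[str], dict[str, int]]:
--     legacy = [item for item in legacy_values if item]
--     evidence = [item for item in evidence_values if item]
--     merged = list(legacy)
--     complements = 0
--     conflicts = 0
--     for item in evidence:
--         if item in legacy:
--             continue
--         if legacy:
--             conflicts += 1
--             continue
--         merged.append(item)
--         complements += 1
--     return merged, {"complements": complements, "conflicts": conflicts}
--
-- def _build_shadow_rollout_report(legacy_metadata: dict[str, object], evidence_metadata: dict[str, object]) -> dict[str, object]: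
--     legacy_summary = legacy_metadata.get("evidence_summary") or {}
--     evidence_summary = evidence_metadata.get("evidence_summary") or {}
--
--     legacy_emails = [item for item in legacy_summary.get("emails", []) if item]
--     legacy_phones = [item for item in legacy_summary.get("phones", []) if item]
--     evidence_emails = [item for item in evidence_summary.get("emails", []) if item]
--     evidence_phones = [item for item in evidence_summary.get("phones", []) if item]
--
--     _, email_stats = _merge_contact_lists(legacy_emails, evidence_emails)
--     _, phone_stats = _merge_contact_lists(legacy_phones, evidence_phones)
--
--     agreements = 0
--     if set(legacy_emails) == set(evidence_emails):
--         agreements += 1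
--     if set(legacy_phones) == set(evidence_phones):
--         agreements += 1
--
--     return {
--         "agreements": agreements,
--         "email_complements": email_stats["complements"],
--         "phone_complements": phone_stats["complements"],
--         "email_conflicts": email_stats["conflicts"],
--         "phone_conflicts": phone_stats["conflicts"],
--     }
-- ===== SOURCE B (Python) =====
-- def _field_stats(legacy_summary, evidence_summary, field):
--     """One field: (sets-agree flag, (complements, conflicts)).
--     Conflicts/complements are both the number of evidence items whose value
--     never occurs in legacy ('miss'), computed from the legacy side: total
--     evidence minus the per-distinct-legacy-value hit counts."""
--     legacy = [x for x in legacy_summary.get(field, []) if x]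
--     evidence = [x for x in evidence_summary.get(field, []) if x]
--     agree = set(legacy) == set(evidence)
--     miss = len(evidence) - sum(evidence.count(v) for v in set(legacy))
--     return agree, ((0, miss) if legacy else (miss, 0))
--
-- def _build_shadow_rollout_report(legacy_metadata, evidence_metadata):
--     legacy_summary = legacy_metadata.get("evidence_summary") or {}
--     evidence_summary = evidence_metadata.get("evidence_summary") or {}
--     email_agree, (email_comp, email_conf) = _field_stats(legacy_summary, evidence_summary, "emails")
--     phone_agree, (phone_comp, phone_conf) = _field_stats(legacy_summary, evidence_summary, "phones")
--     return {
--         "agreements": int(email_agree) + int(phone_agree),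
--         "email_complements": email_comp,
--         "phone_complements": phone_comp,
--         "email_conflicts": email_conf,
--         "phone_conflicts": phone_conf,
--     }
-- ===== Notes on version B (the rewrite author's own statement) =====
-- stated objective: alternative
-- what changed: Dropped _merge_contact_lists and its per-evidence-item loop entirely: a single per-field helper computes both counters from one quantity 'miss' = len(evidence) minus the sum of per-distinct-legacy-value occurrence counts in evidence (counting hits from the legacy side instead of scanning evidence for membership), and routes it to complements or conflicts with one branch on whether filtered legacy is empty; the unused merged list is gone and the two fields are handled by the same helper.
import Mathlib
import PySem

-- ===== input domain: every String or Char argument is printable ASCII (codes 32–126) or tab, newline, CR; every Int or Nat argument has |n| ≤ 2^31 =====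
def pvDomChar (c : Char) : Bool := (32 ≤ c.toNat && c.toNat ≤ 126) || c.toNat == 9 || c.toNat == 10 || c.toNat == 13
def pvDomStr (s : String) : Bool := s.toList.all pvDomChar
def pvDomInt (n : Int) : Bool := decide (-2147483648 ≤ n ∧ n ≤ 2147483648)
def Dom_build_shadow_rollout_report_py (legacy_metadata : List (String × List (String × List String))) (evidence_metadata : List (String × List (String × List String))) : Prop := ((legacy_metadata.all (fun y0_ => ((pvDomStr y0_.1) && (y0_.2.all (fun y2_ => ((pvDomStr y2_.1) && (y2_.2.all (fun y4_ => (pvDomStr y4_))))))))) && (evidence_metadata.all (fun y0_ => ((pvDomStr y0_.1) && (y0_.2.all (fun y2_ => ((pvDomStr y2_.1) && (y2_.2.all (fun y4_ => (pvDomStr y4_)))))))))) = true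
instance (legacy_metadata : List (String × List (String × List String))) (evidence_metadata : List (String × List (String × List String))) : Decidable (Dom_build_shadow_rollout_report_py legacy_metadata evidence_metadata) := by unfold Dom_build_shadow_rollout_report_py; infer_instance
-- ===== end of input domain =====

-- B drops the merge loop: one per-field helper derives both counters from a single
-- legacy-side hit count (len(evidence) minus per-distinct-legacy-value counts).

-- dict.get(k, dflt): first match in the association list
def pvAssocGetD {α : Type} (d : List (String × α)) (k : String) (dflt : α) : α :=
  match d.find? (fun p => p.1 == k) with
  | some p => p.2
  | none => dflt

-- ===== PORT A =====
-- literal port of _merge_contact_lists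
def mergeContactLists (legacy_values evidence_values : List String) :
    List String × List (String × Int) :=
  let legacy := legacy_values.filter (fun s => s ≠ "")
  let evidence := evidence_values.filter (fun s => s ≠ "")
  let st := evidence.foldl (fun (st : List String × Int × Int) item =>
      if item ∈ legacy then st
      else if legacy ≠ [] then (st.1, st.2.1, st.2.2 + 1)
      else (st.1 ++ [item], st.2.1 + 1, st.2.2))
    (legacy, 0, 0)
  (st.1, [("complements", st.2.1), ("conflicts", st.2.2)])

def build_shadow_rollout_report_py (legacy_metadata : List (String × List (String × List String))) (evidence_metadata : List (String × List (String × List String))) : List (String × Int) :=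
  let legacy_summary := pvAssocGetD legacy_metadata "evidence_summary" []
  let evidence_summary := pvAssocGetD evidence_metadata "evidence_summary" []
  let legacy_emails := (pvAssocGetD legacy_summary "emails" []).filter (fun s => s ≠ "")
  let legacy_phones := (pvAssocGetD legacy_summary "phones" []).filter (fun s => s ≠ "")
  let evidence_emails := (pvAssocGetD evidence_summary "emails" []).filter (fun s => s ≠ "")
  let evidence_phones := (pvAssocGetD evidence_summary "phones" []).filter (fun s => s ≠ "")
  let email_stats := (mergeContactLists legacy_emails evidence_emails).2
  let phone_stats := (mergeContactLists legacy_phones evidence_phones).2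
  let agreements : Int :=
    (if PySem.Set.equal (PySem.Set.ofList legacy_emails) (PySem.Set.ofList evidence_emails) then (0:Int) + 1 else 0)
    + (if PySem.Set.equal (PySem.Set.ofList legacy_phones) (PySem.Set.ofList evidence_phones) then 1 else 0)
  [("agreements", agreements),
   ("email_complements", pvAssocGetD email_stats "complements" 0),
   ("phone_complements", pvAssocGetD phone_stats "complements" 0),
   ("email_conflicts", pvAssocGetD email_stats "conflicts" 0),
   ("phone_conflicts", pvAssocGetD phone_stats "conflicts" 0)]

-- ===== PORT B =====
-- literal port of _field_stats: (agree flag, (complements, conflicts));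
-- 'sum(evidence.count(v) for v in set(legacy))' is a sum over the set, order-independent
def fieldStats (legacy_summary evidence_summary : List (String × List String)) (field : String) :
    Bool × (Int × Int) :=
  let legacy := (pvAssocGetD legacy_summary field []).filter (fun s => s ≠ "")
  let evidence := (pvAssocGetD evidence_summary field []).filter (fun s => s ≠ "")
  let agree := PySem.Set.equal (PySem.Set.ofList legacy) (PySem.Set.ofList evidence)
  let miss : Int := (evidence.length : Int)
      - ((PySem.Set.ofList legacy).map (fun v => (evidence.count v : Int))).sum
  (agree, if legacy ≠ [] then (0, miss) else (miss, 0))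

def build_shadow_rollout_report_py_alt (legacy_metadata : List (String × List (String × List String))) (evidence_metadata : List (String × List (String × List String))) : List (String × Int) :=
  let legacy_summary := pvAssocGetD legacy_metadata "evidence_summary" []
  let evidence_summary := pvAssocGetD evidence_metadata "evidence_summary" []
  let e := fieldStats legacy_summary evidence_summary "emails"
  let p := fieldStats legacy_summary evidence_summary "phones"
  [("agreements", (if e.1 then (1:Int) else 0) + (if p.1 then 1 else 0)),
   ("email_complements", e.2.1),
   ("phone_complements", p.2.1),
   ("email_conflicts", e.2.2),
   ("phone_conflicts", p.2.2)]

-- ===== PRECONDITION & SPEC =====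
def Spec_build_shadow_rollout_report_py (legacy_metadata : List (String × List (String × List String))) (evidence_metadata : List (String × List (String × List String))) (out : List (String × Int)) : Prop := out = build_shadow_rollout_report_py_alt legacy_metadata evidence_metadata
instance (legacy_metadata : List (String × List (String × List String))) (evidence_metadata : List (String × List (String × List String))) (out : List (String × Int)) : Decidable (Spec_build_shadow_rollout_report_py legacy_metadata evidence_metadata out) := by unfold Spec_build_shadow_rollout_report_py; infer_instance

-- ===== CLAIM (what is proved, stated in full; the proofs are below) =====
def Claim_equal_build_shadow_rollout_report_py : Prop := ∀ (legacy_metadata : List (String × List (String × List String))) (evidence_metadata : List (String × List (String × List String))), Dom_build_shadow_rollout_report_py legacy_metadata evidence_metadata → Spec_build_shadow_rollout_report_py legacy_metadata evidence_metadata (build_shadow_rollout_report_py legacy_metadata evidence_metadata)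

-- ===== LEMMAS AND PROOFS =====

-- A's loop: complements only grow (by the evidence length) when legacy is empty,
-- conflicts only grow (by the non-member count) when legacy is nonempty.
lemma merge_loop_spec (legacy : List String) :
    ∀ (ev m : List String) (c k : Int),
      ev.foldl (fun (st : List String × Int × Int) item =>
          if item ∈ legacy then st
          else if legacy ≠ [] then (st.1, st.2.1, st.2.2 + 1)
          else (st.1 ++ [item], st.2.1 + 1, st.2.2)) (m, c, k)
      = if legacy = [] then (m ++ ev, c + ev.length, k)
        else (m, c, k + (ev.countP (fun x => !(decide (x ∈ legacy))) : Int)) := by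
  intro ev
  induction ev with
  | nil => intro m c k; simp
  | cons x xs ih =>
    intro m c k
    simp only [List.foldl_cons]
    by_cases hleg : legacy = []
    · subst hleg
      rw [if_neg (by simp), if_neg (by simp), ih]
      simp
      omega
    · by_cases hx : x ∈ legacy
      · rw [if_pos hx, ih]
        simp [hleg, hx]
      · rw [if_neg hx, if_pos hleg, ih]
        simp [hleg, hx]
        omega

-- splitting a countP over a fresh head of the membership list
lemma countP_mem_cons (v : String) (S E : List String) (hv : v ∉ S) :
    E.countP (fun x => decide (x ∈ v :: S)) = E.count v + E.countP (fun x => decide (x ∈ S)) := by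
  induction E with
  | nil => simp
  | cons x E ih =>
    rw [List.countP_cons, List.count_cons, List.countP_cons, ih]
    by_cases hx : x = v
    · subst hx
      simp [hv]
      omega
    · by_cases hS : x ∈ S <;> simp [hx, hS, List.mem_cons] <;> omega

-- summing per-distinct-value counts = counting members
lemma sum_count_nodup (S E : List String) (h : S.Nodup) :
    (S.map (fun v => (E.count v : Int))).sum = (E.countP (fun x => decide (x ∈ S)) : Int) := by
  induction S with
  | nil => simp
  | cons v S ih =>
    rcases List.nodup_cons.mp h with ⟨hv, hS⟩
    simp only [List.map_cons, List.sum_cons, ih hS]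
    rw [countP_mem_cons v S E hv]
    push_cast
    ring

-- A's counters equal B's (miss-based) counters, for already-filtered lists
lemma merge_eq_stats (lv ev : List String) (hl : lv = lv.filter (fun s => s ≠ ""))
    (he : ev = ev.filter (fun s => s ≠ "")) :
    pvAssocGetD (mergeContactLists lv ev).2 "complements" 0
      = (if lv ≠ [] then (0:Int)
         else (ev.length : Int) - ((PySem.Set.ofList lv).map (fun v => (ev.count v : Int))).sum) ∧
    pvAssocGetD (mergeContactLists lv ev).2 "conflicts" 0
      = (if lv ≠ [] then (ev.length : Int) - ((PySem.Set.ofList lv).map (fun v => (ev.count v : Int))).sum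
         else (0:Int)) := by
  have hsum : ((PySem.Set.ofList lv).map (fun v => (ev.count v : Int))).sum
      = (ev.countP (fun x => decide (x ∈ lv)) : Int) := by
    rw [sum_count_nodup (PySem.Set.ofList lv) ev (PySem.Set.nodup_ofList lv)]
    congr 1
    apply List.countP_congr
    intro x _
    simp [PySem.Set.mem_ofList]
  have hnot : ev.countP (fun x => !(decide (x ∈ lv))) = ev.length - ev.countP (fun x => decide (x ∈ lv)) := by
    have h1 := List.length_eq_countP_add_countP (l := ev) (p := fun x => decide (x ∈ lv))
    have h2 : ev.countP (fun a => decide ¬(decide (a ∈ lv) = true)) = ev.countP (fun x => !(decide (x ∈ lv))) := by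
      apply List.countP_congr; intro x _; simp
    omega
  have hcle := List.countP_le_length (p := fun x => decide (x ∈ lv)) (l := ev)
  have hmiss : (ev.length : Int) - ((PySem.Set.ofList lv).map (fun v => (ev.count v : Int))).sum
      = (ev.countP (fun x => !(decide (x ∈ lv))) : Int) := by
    rw [hsum]
    omega
  simp only [mergeContactLists]
  rw [← hl, ← he, merge_loop_spec]
  by_cases h : lv = []
  · constructor <;> simp [h, pvAssocGetD, hmiss]
  · constructor <;> simp [h, pvAssocGetD, hmiss]

-- ===== VERDICT (by name: the statement is the Claim_ definition above) =====
theorem build_shadow_rollout_report_py_spec : Claim_equal_build_shadow_rollout_report_py := by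
  intro lm em _
  show _ = _
  have hE := merge_eq_stats
    ((pvAssocGetD (pvAssocGetD lm "evidence_summary" []) "emails" []).filter (fun s => s ≠ ""))
    ((pvAssocGetD (pvAssocGetD em "evidence_summary" []) "emails" []).filter (fun s => s ≠ ""))
    (by rw [List.filter_filter]; simp) (by rw [List.filter_filter]; simp)
  have hP := merge_eq_stats
    ((pvAssocGetD (pvAssocGetD lm "evidence_summary" []) "phones" []).filter (fun s => s ≠ ""))
    ((pvAssocGetD (pvAssocGetD em "evidence_summary" []) "phones" []).filter (fun s => s ≠ ""))
    (by rw [List.filter_filter]; simp) (by rw [List.filter_filter]; simp)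
  simp only [build_shadow_rollout_report_py, build_shadow_rollout_report_py_alt, fieldStats,
    apply_ite Prod.fst, apply_ite Prod.snd]
  rw [hE.1, hE.2, hP.1, hP.2]
  norm_num
  rfl
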